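-- pv_equiv track=rewrite | github.com/eliagilad/text-explainability | src/utils/evaluation.py | merge_owen_for_tokens
-- ===== SOURCE A (Python) =====
-- def merge_owen_for_tokens(owen_values, tokens_map):
--     new_owen = [owen_values[0]]
--     last_position = 0
--
--     for i in range(1, len(tokens_map)):
--         if (tokens_map[i-1] is None) or (tokens_map[i-1] == tokens_map[i]):
--             new_owen[last_position] += owen_values[i]
--         else:
--             last_position += 1
--             new_owen.append(owen_values[i])
--
--     return new_owen
-- ===== SOURCE B (Python) =====
-- def merge_owen_for_tokens(owen_values, tokens_map):
--     bounds = [0]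
--     for i in range(1, len(tokens_map)):
--         if tokens_map[i - 1] is not None and tokens_map[i - 1] != tokens_map[i]:
--             bounds.append(i)
--     bounds.append(len(tokens_map))
--     return [sum(owen_values[bounds[j]:bounds[j + 1]]) for j in range(len(bounds) - 1)]
-- ===== Notes on version B (the rewrite author's own statement) =====
-- stated objective: alternative
-- what changed: A mutates a running accumulator list in one pass (adding into the last cell or appending); B first collects group-start indices into a bounds table and then sums each owen_values slice between consecutive bounds. Pre_ excludes an empty tokens_map, a token-less corner on which A's value [owen_values[0]] is an artefact of its unconditional seed and either value is defensible.
-- outside the precondition, e.g. on merge_owen_for_tokens([5], []): A returns [5], B returns [0]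
import Mathlib
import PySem

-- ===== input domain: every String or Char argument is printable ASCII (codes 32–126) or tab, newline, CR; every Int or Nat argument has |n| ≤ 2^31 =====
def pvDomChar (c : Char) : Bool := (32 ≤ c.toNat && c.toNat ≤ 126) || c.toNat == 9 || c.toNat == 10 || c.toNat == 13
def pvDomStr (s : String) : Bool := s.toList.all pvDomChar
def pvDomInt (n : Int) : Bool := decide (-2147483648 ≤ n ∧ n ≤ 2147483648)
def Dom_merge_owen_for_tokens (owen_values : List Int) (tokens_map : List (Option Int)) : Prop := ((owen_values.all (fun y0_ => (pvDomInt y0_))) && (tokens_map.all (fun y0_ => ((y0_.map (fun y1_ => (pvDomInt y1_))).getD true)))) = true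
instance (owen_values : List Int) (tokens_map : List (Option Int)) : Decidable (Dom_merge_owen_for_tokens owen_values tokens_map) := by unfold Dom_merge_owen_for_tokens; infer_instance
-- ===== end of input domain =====

-- B replaces A's running accumulator (mutating the last cell of the output) by a two-phase
-- structure: collect group-start indices, then sum each slice; same O(n) cost ("alternative").

-- ===== PORT A =====
-- loop body of A; last_position is a nonnegative counter, modeled as Nat
-- (new_owen[last_position] is always in range: last_position = len(new_owen)-1 throughout).
def stepA (owen_values : List Int) (tokens_map : List (Option Int)) (st : List Int × Nat) (i : Int) : List Int × Nat :=
  if PySem.List.pyGetD tokens_map (i-1) none = none ∨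
     PySem.List.pyGetD tokens_map (i-1) none = PySem.List.pyGetD tokens_map i none then
    (st.1.set st.2 (st.1.getD st.2 0 + PySem.List.pyGetD owen_values i 0), st.2)
  else
    (st.1 ++ [PySem.List.pyGetD owen_values i 0], st.2 + 1)

-- owen_values[0] and owen_values[i] are in range under Pre_, so pyGetD's default is never used.
def merge_owen_for_tokens (owen_values : List Int) (tokens_map : List (Option Int)) : List Int :=
  ((PySem.List.pyRange 1 (tokens_map.length : Int) 1).foldl (stepA owen_values tokens_map)
    ([PySem.List.pyGetD owen_values 0 0], 0)).1

-- ===== PORT B =====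
-- loop body of B: record i as a group start when tokens_map[i-1] is not None and differs from tokens_map[i]
def stepB (tokens_map : List (Option Int)) (bs : List Int) (i : Int) : List Int :=
  if PySem.List.pyGetD tokens_map (i-1) none ≠ none ∧
     PySem.List.pyGetD tokens_map (i-1) none ≠ PySem.List.pyGetD tokens_map i none then
    bs ++ [i]
  else bs

-- the comprehension [sum(owen_values[bounds[j]:bounds[j+1]]) for j in range(len(bounds)-1)]
def segSums (owen_values : List Int) (bounds : List Int) : List Int :=
  (List.range (bounds.length - 1)).map (fun j =>
    (PySem.List.slice owen_values (some (bounds.getD j 0)) (some (bounds.getD (j+1) 0))).sum)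

def merge_owen_for_tokens_alt (owen_values : List Int) (tokens_map : List (Option Int)) : List Int :=
  let bounds := (PySem.List.pyRange 1 (tokens_map.length : Int) 1).foldl (stepB tokens_map) [0]
  let bounds := bounds ++ [(tokens_map.length : Int)]
  segSums owen_values bounds

-- ===== PRECONDITION & SPEC =====
-- A raises IndexError unless owen_values ≠ [] and len(tokens_map) ≤ len(owen_values).
-- Pre_ additionally excludes an empty tokens_map: a token-less input on which A still
-- returns [owen_values[0]] (an artefact of its unconditional seed) while B returns [0];
-- either value is defensible for an input with no tokens to merge.
def Pre_merge_owen_for_tokens (owen_values : List Int) (tokens_map : List (Option Int)) : Prop :=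
  owen_values ≠ [] ∧ tokens_map ≠ [] ∧ tokens_map.length ≤ owen_values.length
instance (owen_values : List Int) (tokens_map : List (Option Int)) : Decidable (Pre_merge_owen_for_tokens owen_values tokens_map) := by unfold Pre_merge_owen_for_tokens; infer_instance

def pvWitness_merge_owen_for_tokens : List Int × List (Option Int) :=
  ([1, 2, 3, 4], [some 0, some 0, none, some 1])

def Spec_merge_owen_for_tokens (owen_values : List Int) (tokens_map : List (Option Int)) (out : List Int) : Prop := out = merge_owen_for_tokens_alt owen_values tokens_map
instance (owen_values : List Int) (tokens_map : List (Option Int)) (out : List Int) : Decidable (Spec_merge_owen_for_tokens owen_values tokens_map out) := by unfold Spec_merge_owen_for_tokens; infer_instance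

-- ===== CLAIM (what is proved, stated in full; the proofs are below) =====
def Claim_equal_merge_owen_for_tokens : Prop := ∀ (owen_values : List Int) (tokens_map : List (Option Int)), Dom_merge_owen_for_tokens owen_values tokens_map → Pre_merge_owen_for_tokens owen_values tokens_map → Spec_merge_owen_for_tokens owen_values tokens_map (merge_owen_for_tokens owen_values tokens_map)

-- ===== LEMMAS AND PROOFS =====

lemma seg_single (ov : List Int) (a : Int) : segSums ov [a] = [] := by
  simp [segSums]

lemma seg_pair (ov : List Int) (a b : Int) :
    segSums ov [a, b] = [(PySem.List.slice ov (some a) (some b)).sum] := by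
  simp [segSums]

lemma seg_cons (ov : List Int) (a b : Int) (t : List Int) :
    segSums ov (a :: b :: t) =
      (PySem.List.slice ov (some a) (some b)).sum :: segSums ov (b :: t) := by
  simp [segSums, List.range_succ_eq_map, List.map_map, Function.comp_def]

lemma seg_length (ov bs : List Int) : (segSums ov bs).length = bs.length - 1 := by
  simp [segSums]

lemma seg_split (ov : List Int) :
    ∀ (bs : List Int) (a : Int) (rest : List Int),
      segSums ov (bs ++ a :: rest) = segSums ov (bs ++ [a]) ++ segSums ov (a :: rest) := by
  intro bs
  induction bs with
  | nil => intro a rest; simp [seg_single]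
  | cons b bs ih =>
    intro a rest
    cases bs with
    | nil => simp [seg_cons, seg_single]
    | cons c bs' =>
      have h1 : (b :: c :: bs') ++ a :: rest = b :: c :: (bs' ++ a :: rest) := by simp
      have h2 : (b :: c :: bs') ++ [a] = b :: c :: (bs' ++ [a]) := by simp
      rw [h1, h2, seg_cons]
      have h3 : c :: (bs' ++ a :: rest) = (c :: bs') ++ a :: rest := by simp
      have h4 : c :: (bs' ++ [a]) = (c :: bs') ++ [a] := by simp
      rw [h3, ih a rest, ← h4, seg_cons]
      simp

lemma seg_snoc2 (ov : List Int) (bs : List Int) (a e : Int) :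
    segSums ov (bs ++ [a, e]) =
      segSums ov (bs ++ [a]) ++ [(PySem.List.slice ov (some a) (some e)).sum] := by
  have : bs ++ [a, e] = bs ++ a :: [e] := by simp
  rw [this, seg_split, seg_cons, seg_single]

lemma set_snoc (ys : List Int) (y v : Int) : (ys ++ [y]).set ys.length v = ys ++ [v] := by
  induction ys with
  | nil => simp
  | cons z zs ih => simp [ih]

lemma getD_snoc (ys : List Int) (y : Int) : (ys ++ [y]).getD ys.length 0 = y := by
  induction ys with
  | nil => simp
  | cons z zs _ => simp [List.getD]

lemma slice_sum_succ (ov : List Int) (l : Int) (k : Nat) (h0 : 0 ≤ l) (hlk : l ≤ (k : Int))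
    (hk : k < ov.length) :
    (PySem.List.slice ov (some l) (some ((k : Int) + 1))).sum
      = (PySem.List.slice ov (some l) (some (k : Int))).sum + ov.getD k 0 := by
  rw [PySem.List.slice_toNat ov h0 (by omega), PySem.List.slice_toNat ov h0 (by exact_mod_cast Nat.cast_nonneg k)]
  have h1 : ((k : Int) + 1).toNat = k + 1 := by omega
  have h2 : ((k : Int)).toNat = k := by omega
  have hm : l.toNat ≤ k := by omega
  rw [h1, h2]
  have h3 : k + 1 - l.toNat = (k - l.toNat) + 1 := by omega
  rw [h3, List.take_add_one]
  have hidx : k - l.toNat < (ov.drop l.toNat).length := by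
    simp only [List.length_drop]; omega
  rw [List.getElem?_eq_getElem hidx]
  have h4 : (ov.drop l.toNat)[k - l.toNat] = ov[k]'hk := by
    rw [List.getElem_drop]
    congr 1
    omega
  rw [h4]
  simp [List.getD, List.getElem?_eq_getElem hk]

lemma slice_adj (ov : List Int) (k : Nat) (hk : k < ov.length) :
    (PySem.List.slice ov (some (k : Int)) (some ((k : Int) + 1))).sum = ov.getD k 0 := by
  rw [slice_sum_succ ov (k : Int) k (by positivity) le_rfl hk]
  rw [PySem.List.slice_natCast]
  simp

lemma seg01 (ov : List Int) (hov : ov ≠ []) :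
    segSums ov [0, 1] = [PySem.List.pyGetD ov 0 0] := by
  obtain ⟨h0, t, rfl⟩ := List.exists_cons_of_ne_nil hov
  rw [seg_pair]
  have : PySem.List.slice (h0 :: t) (some ((0 : Nat) : Int)) (some ((1 : Nat) : Int))
      = ((h0 :: t).drop 0).take (1 - 0) := PySem.List.slice_natCast _ 0 1
  simp only [Nat.cast_zero, Nat.cast_one] at this
  rw [this]
  simp [PySem.List.pyGetD_zero]

lemma inv_main (ov : List Int) (tm : List (Option Int)) (hov : ov ≠ [])
    (hlen : tm.length ≤ ov.length) :
    ∀ k : Nat, 1 ≤ k → k ≤ tm.length →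
      ((PySem.List.pyRange 1 (k : Int) 1).foldl (stepA ov tm) ([PySem.List.pyGetD ov 0 0], 0)
        = (segSums ov (((PySem.List.pyRange 1 (k : Int) 1).foldl (stepB tm) [0]) ++ [(k : Int)]),
           ((PySem.List.pyRange 1 (k : Int) 1).foldl (stepB tm) [0]).length - 1))
      ∧ ((PySem.List.pyRange 1 (k : Int) 1).foldl (stepB tm) [0]) ≠ []
      ∧ ∀ x ∈ ((PySem.List.pyRange 1 (k : Int) 1).foldl (stepB tm) [0]), 0 ≤ x ∧ x < (k : Int) := by
  intro k hk
  induction k, hk using Nat.le_induction with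
  | base =>
    intro _
    have hr : PySem.List.pyRange 1 ((1 : Nat) : Int) 1 = [] := by
      rw [PySem.List.pyRange_one_eq_nil]; omega
    rw [hr]
    simp only [List.foldl_nil]
    refine ⟨?_, by simp, by intro x hx; simp at hx; omega⟩
    have h01 : ([(0 : Int)] ++ [((1 : Nat) : Int)]) = [0, 1] := by norm_num
    rw [h01, seg01 ov hov]
    simp
  | succ k hk1 ih =>
    intro hk2
    have hkn : k ≤ tm.length := by omega
    obtain ⟨hA, hne, hmem⟩ := ih hkn
    have hr : PySem.List.pyRange 1 (((k + 1 : Nat)) : Int) 1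
        = PySem.List.pyRange 1 (k : Int) 1 ++ [(k : Int)] := by
      have : (((k + 1 : Nat)) : Int) = (k : Int) + 1 := by push_cast; ring
      rw [this, PySem.List.pyRange_one_succ_right]
      exact_mod_cast hk1
    rw [hr, List.foldl_append, List.foldl_append, hA]
    simp only [List.foldl_cons, List.foldl_nil]
    have hklen : k < ov.length := by omega
    by_cases hc : PySem.List.pyGetD tm ((k : Int) - 1) none = none ∨
        PySem.List.pyGetD tm ((k : Int) - 1) none = PySem.List.pyGetD tm (k : Int) none
    · -- merge into the current group: bounds unchanged
      have hBeq : stepB tm ((PySem.List.pyRange 1 (k : Int) 1).foldl (stepB tm) [0]) (k : Int)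
          = (PySem.List.pyRange 1 (k : Int) 1).foldl (stepB tm) [0] := by
        unfold stepB
        rw [if_neg]; tauto
      rw [hBeq]
      obtain hbs | ⟨ys, l, hbs⟩ :=
        List.eq_nil_or_concat ((PySem.List.pyRange 1 (k : Int) 1).foldl (stepB tm) [0])
      · exact absurd hbs hne
      rw [hbs] at hmem ⊢
      simp only [List.concat_eq_append] at hmem ⊢
      have hl : 0 ≤ l ∧ l < (k : Int) := hmem l (by simp)
      unfold stepA
      rw [if_pos hc]
      constructor
      · have hassoc : (ys ++ [l]) ++ [(k : Int)] = ys ++ [l, (k : Int)] := by simp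
        have hassoc' : (ys ++ [l]) ++ [((k + 1 : Nat) : Int)] = ys ++ [l, (k : Int) + 1] := by
          push_cast; simp
        rw [hassoc, hassoc', seg_snoc2, seg_snoc2]
        have hlen1 : (ys ++ [l]).length - 1 = ys.length := by simp
        have hlen2 : (segSums ov (ys ++ [l])).length = ys.length := by
          rw [seg_length]; simp
        rw [hlen1, ← hlen2, getD_snoc, set_snoc]
        congr 2
        rw [PySem.List.pyGetD_natCast ov k 0,
          slice_sum_succ ov l k hl.1 (le_of_lt hl.2) hklen]
      · refine ⟨by simp, ?_⟩
        intro x hx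
        have := hmem x hx
        constructor
        · exact this.1
        · have : x < (k : Int) := this.2
          push_cast; omega
    · -- new group starts at k
      rw [not_or] at hc
      have hBeq : stepB tm ((PySem.List.pyRange 1 (k : Int) 1).foldl (stepB tm) [0]) (k : Int)
          = (PySem.List.pyRange 1 (k : Int) 1).foldl (stepB tm) [0] ++ [(k : Int)] := by
        unfold stepB
        rw [if_pos hc]
      rw [hBeq]
      unfold stepA
      rw [if_neg (by tauto)]
      constructor
      · simp only [Prod.mk.injEq]
        constructor
        · have hassoc : ((PySem.List.pyRange 1 (k : Int) 1).foldl (stepB tm) [0] ++ [(k : Int)])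
              ++ [((k + 1 : Nat) : Int)]
              = (PySem.List.pyRange 1 (k : Int) 1).foldl (stepB tm) [0] ++ [(k : Int), (k : Int) + 1] := by
            push_cast; simp
          rw [hassoc, seg_snoc2]
          congr 2
          rw [PySem.List.pyGetD_natCast ov k 0, slice_adj ov k hklen]
        · have : 1 ≤ ((PySem.List.pyRange 1 (k : Int) 1).foldl (stepB tm) [0]).length :=
            List.length_pos_iff.mpr hne
          simp only [List.length_append, List.length_cons, List.length_nil]
          omega
      · refine ⟨by simp, ?_⟩
        intro x hx
        rcases List.mem_append.mp hx with hx | hx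
        · have := hmem x hx
          refine ⟨this.1, ?_⟩
          have : x < (k : Int) := this.2
          push_cast; omega
        · simp at hx
          subst hx
          constructor
          · positivity
          · push_cast; omega

-- ===== VERDICT (by name: the statement is the Claim_ definition above) =====
theorem merge_owen_for_tokens_spec : Claim_equal_merge_owen_for_tokens := by
  intro ov tm _ hpre
  obtain ⟨hov, htm, hlen⟩ := hpre
  show merge_owen_for_tokens ov tm = merge_owen_for_tokens_alt ov tm
  simp only [merge_owen_for_tokens, merge_owen_for_tokens_alt]
  have hpos : 0 < tm.length := List.length_pos_iff.mpr htm
  obtain ⟨hA, -, -⟩ := inv_main ov tm hov hlen tm.length hpos le_rfl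
  rw [hA]
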